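-- pv_equiv track=rewrite | github.com/Andrew3100/DjangoLessons | interface/views.py | get_a_set_of_filters
-- ===== SOURCE A (Python) =====
-- def get_a_set_of_filters(filters):
--     filters_types = list(filters.values())
--     filters_fields = list(filters.keys())
--     counts_f = []
--     fields_f = []
--     dates_f = []
--
--     for i in range(0, len(filters_types)):
--         if filters_types[i] == 'count':
--             counts_f.append(filters_fields[i])
--         if filters_types[i] == 'date':
--             dates_f.append(filters_fields[i])
--         if filters_types[i] == 'field':
--             fields_f.append(filters_fields[i])
--     return fields_f, counts_f, dates_f
-- ===== SOURCE B (Python) =====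
-- def get_a_set_of_filters(filters):
--     groups = {}
--     for field, ftype in filters.items():
--         groups.setdefault(ftype, []).append(field)
--     return groups.get('field', []), groups.get('count', []), groups.get('date', [])
-- ===== Notes on version B (the rewrite author's own statement) =====
-- stated objective: simpler
-- what changed: Replaces the index loop over parallel keys/values lists with a three-way if chain by a single grouping dict built in one pass over items() (setdefault+append), returning the three groups by lookup.
import Mathlib
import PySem

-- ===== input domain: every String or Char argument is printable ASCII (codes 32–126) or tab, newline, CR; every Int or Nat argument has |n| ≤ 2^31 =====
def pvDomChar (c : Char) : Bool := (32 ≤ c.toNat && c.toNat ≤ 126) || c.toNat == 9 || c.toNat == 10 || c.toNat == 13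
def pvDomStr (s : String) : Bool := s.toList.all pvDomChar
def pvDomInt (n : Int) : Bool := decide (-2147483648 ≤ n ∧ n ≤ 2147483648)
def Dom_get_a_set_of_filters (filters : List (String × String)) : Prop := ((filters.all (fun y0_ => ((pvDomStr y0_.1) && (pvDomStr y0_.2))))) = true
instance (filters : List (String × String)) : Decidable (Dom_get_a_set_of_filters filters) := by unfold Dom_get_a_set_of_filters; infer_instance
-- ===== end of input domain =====

-- B replaces A's index loop over parallel keys/values lists (three-way if chain) by a
-- single grouping dict built in one pass over items(); same result, no speed claim.

-- ===== PORT A =====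
-- state is (counts_f, fields_f, dates_f); the Python returns (fields_f, counts_f, dates_f)
def get_a_set_of_filters (filters : List (String × String)) : List String × List String × List String :=
  let filters_types := filters.map (·.2)    -- list(filters.values())
  let filters_fields := filters.map (·.1)   -- list(filters.keys())
  let r := (PySem.List.pyRange 0 (filters_types.length : Int) 1).foldl
    (fun (acc : List String × List String × List String) i =>
      -- filters_types[i] / filters_fields[i]; i is always in range, so getD "" is exact
      let t := PySem.List.pyGetD filters_types i ""
      let k := PySem.List.pyGetD filters_fields i ""
      let counts_f := if t == "count" then acc.1 ++ [k] else acc.1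
      let dates_f  := if t == "date"  then acc.2.2 ++ [k] else acc.2.2
      let fields_f := if t == "field" then acc.2.1 ++ [k] else acc.2.1
      (counts_f, fields_f, dates_f))
    ([], [], [])
  (r.2.1, r.1, r.2.2)

-- ===== PORT B =====
-- groups.setdefault(ftype, []).append(field)  ==  groups[ftype] = groups.get(ftype, []) + [field]
def get_a_set_of_filters_alt (filters : List (String × String)) : List String × List String × List String :=
  let groups := filters.foldl
    (fun (d : PySem.Dict String (List String)) p => d.modify p.2 [] (· ++ [p.1]))
    PySem.Dict.empty
  (groups.getD "field" [], groups.getD "count" [], groups.getD "date" [])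

-- ===== PRECONDITION & SPEC =====
def Spec_get_a_set_of_filters (filters : List (String × String)) (out : List String × List String × List String) : Prop := out = get_a_set_of_filters_alt filters
instance (filters : List (String × String)) (out : List String × List String × List String) : Decidable (Spec_get_a_set_of_filters filters out) := by unfold Spec_get_a_set_of_filters; infer_instance

-- ===== CLAIM (what is proved, stated in full; the proofs are below) =====
def Claim_equal_get_a_set_of_filters : Prop := ∀ (filters : List (String × String)), Dom_get_a_set_of_filters filters → Spec_get_a_set_of_filters filters (get_a_set_of_filters filters)

-- ===== LEMMAS AND PROOFS =====

-- the common characterization: keys whose value equals c, in order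
def pvGroup (filters : List (String × String)) (c : String) : List String :=
  (filters.filter (fun p => p.2 == c)).map (·.1)

-- A's loop, generalized over the accumulator
lemma a_loop_char (l : List (String × String)) :
    ∀ (cs fs ds : List String),
      l.foldl
        (fun (acc : List String × List String × List String) p =>
          (if p.2 == "count" then acc.1 ++ [p.1] else acc.1,
           if p.2 == "field" then acc.2.1 ++ [p.1] else acc.2.1,
           if p.2 == "date"  then acc.2.2 ++ [p.1] else acc.2.2))
        (cs, fs, ds)
      = (cs ++ pvGroup l "count", fs ++ pvGroup l "field", ds ++ pvGroup l "date") := by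
  induction l with
  | nil => intro cs fs ds; simp [pvGroup]
  | cons p t ih =>
    intro cs fs ds
    simp only [List.foldl_cons, ih]
    simp only [pvGroup, List.filter_cons]
    by_cases h1 : p.2 == "count" <;> by_cases h2 : p.2 == "field" <;> by_cases h3 : p.2 == "date" <;>
      simp_all

lemma b_getD (filters : List (String × String)) (c : String) :
    (filters.foldl
      (fun (d : PySem.Dict String (List String)) p => d.modify p.2 [] (· ++ [p.1]))
      PySem.Dict.empty).getD c [] = pvGroup filters c := by
  have h := PySem.Dict.getD_foldl_modify_append
      (l := filters.map (fun p => (p.2, p.1))) (d := PySem.Dict.empty) (c := c)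
  rw [List.foldl_map] at h
  simp only [h, PySem.Dict.getD_empty, List.nil_append, List.filter_map, pvGroup]
  simp [List.map_map, Function.comp_def]

lemma pair_map (xs ys : List String) (h : ys.length = xs.length) (d : String) :
    (PySem.List.pyRange 0 (xs.length : Int) 1).map
        (fun i => (PySem.List.pyGetD xs i d, PySem.List.pyGetD ys i d))
      = xs.zip ys := by
  have hx : (PySem.List.pyRange 0 (xs.length : Int) 1).map (fun j => PySem.List.pyGetD xs j d) = xs :=
    PySem.List.map_pyGetD_pyRange_zero' (xs := xs) (d := d)
  have hy : (PySem.List.pyRange 0 (xs.length : Int) 1).map (fun j => PySem.List.pyGetD ys j d) = ys := by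
    rw [← h]; exact PySem.List.map_pyGetD_pyRange_zero' (xs := ys) (d := d)
  calc (PySem.List.pyRange 0 (xs.length : Int) 1).map
          (fun i => (PySem.List.pyGetD xs i d, PySem.List.pyGetD ys i d))
      = ((PySem.List.pyRange 0 (xs.length : Int) 1).map (fun j => PySem.List.pyGetD xs j d)).zip
          ((PySem.List.pyRange 0 (xs.length : Int) 1).map (fun j => PySem.List.pyGetD ys j d)) := by
        rw [List.zip_map']
    _ = xs.zip ys := by rw [hx, hy]

lemma foldl_map_exp {α β S : Type} (f : α → β) (g : S → β → S) (l : List α) (init : S) :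
    (l.map f).foldl g init = l.foldl (fun a x => g a (f x)) init := by
  induction l generalizing init <;> simp [*]

lemma foldA {S : Type} (g : S → String → String → S) (filters : List (String × String)) (init : S) :
    (PySem.List.pyRange 0 (((filters.map (·.2)).length : Int)) 1).foldl
        (fun acc i => g acc (PySem.List.pyGetD (filters.map (·.2)) i "")
                            (PySem.List.pyGetD (filters.map (·.1)) i "")) init
      = filters.foldl (fun acc p => g acc p.2 p.1) init := by
  rw [← foldl_map_exp
        (fun i => (PySem.List.pyGetD (filters.map (·.2)) i "",
                   PySem.List.pyGetD (filters.map (·.1)) i ""))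
        (fun acc (p : String × String) => g acc p.1 p.2)]
  rw [pair_map (filters.map (·.2)) (filters.map (·.1)) (by simp) ""]
  rw [List.zip_map', foldl_map_exp]

lemma a_char (filters : List (String × String)) :
    get_a_set_of_filters filters
      = (pvGroup filters "field", pvGroup filters "count", pvGroup filters "date") := by
  simp only [get_a_set_of_filters]
  rw [foldA (fun acc t k =>
        (if t == "count" then acc.1 ++ [k] else acc.1,
         if t == "field" then acc.2.1 ++ [k] else acc.2.1,
         if t == "date"  then acc.2.2 ++ [k] else acc.2.2))]
  rw [a_loop_char]
  simp

-- ===== VERDICT (by name: the statement is the Claim_ definition above) =====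
theorem get_a_set_of_filters_spec : Claim_equal_get_a_set_of_filters := by
  intro filters _
  unfold Spec_get_a_set_of_filters get_a_set_of_filters_alt
  rw [a_char]
  simp [b_getD]
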